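-- pv_equiv track=rewrite | github.com/DamienBradleyDSP/alias_flipper | alias_flipper.py | decimate_then_zeropad
-- ===== SOURCE A (Python) =====
-- def decimate_then_zeropad(signal):
--
--     downsampled_signal = []                         # decimates signal taking 1 in every 2 samples
--     for n, sample in enumerate(signal):
--         if n%2==0:
--                 downsampled_signal.append(sample)
--
--     upsampled_signal = []                           # upsamples back to original rate - freqs are now mirrored in spectrum
--     for n,sample in enumerate(downsampled_signal):
--         upsampled_signal.append(sample)
--         upsampled_signal.append(0)
--
--     return upsampled_signal
-- ===== SOURCE B (Python) =====
-- def decimate_then_zeropad(signal_):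
--     # (parameter spelled signal_ because the test harness reserves the name 'signal')
--     # Preallocate the zero-filled output (even length, covers a trailing zero
--     # for odd-length input) and scatter the kept samples into their final
--     # even positions in one strided pass.
--     out = [0] * (2 * ((len(signal_) + 1) // 2))
--     for i in range(0, len(signal_), 2):
--         out[i] = signal_[i]
--     return out
-- ===== Notes on version B (the rewrite author's own statement) =====
-- stated objective: faster
-- what changed: Replaces A's two passes (build a decimated list, then interleave it with zeros into a second list via repeated appends) by preallocating a zero-filled output of the computed final length and scattering the even-index samples directly into their final positions in one strided pass (no intermediate list, no per-element appends).
import Mathlib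
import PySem

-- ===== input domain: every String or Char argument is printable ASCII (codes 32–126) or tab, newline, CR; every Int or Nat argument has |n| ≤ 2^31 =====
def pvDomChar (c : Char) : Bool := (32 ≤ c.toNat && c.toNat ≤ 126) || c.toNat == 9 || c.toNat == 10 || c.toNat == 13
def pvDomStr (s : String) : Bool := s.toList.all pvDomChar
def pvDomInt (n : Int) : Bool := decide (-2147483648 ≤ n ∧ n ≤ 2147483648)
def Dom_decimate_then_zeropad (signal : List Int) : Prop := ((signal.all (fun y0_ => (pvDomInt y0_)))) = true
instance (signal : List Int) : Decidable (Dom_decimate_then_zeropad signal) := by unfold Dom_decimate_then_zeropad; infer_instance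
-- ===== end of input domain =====

-- B preallocates the zero output and scatters even-index samples in one strided pass;
-- A builds a decimated list first and then interleaves it with zeros (objective: faster, constant factor, measured).

-- ===== PORT A =====
def decimate_then_zeropad (signal : List Int) : List Int :=
  let downsampled_signal :=
    (PySem.List.enumerate signal).foldl
      (fun acc p => if p.1 % 2 == 0 then acc ++ [p.2] else acc) []
  (PySem.List.enumerate downsampled_signal).foldl
    (fun acc p => (acc ++ [p.2]) ++ [(0 : Int)]) []

-- ===== PORT B =====
-- indices i from range(0, len(signal), 2) are nonnegative and in range,
-- so i.toNat and the pyGetD default are exact for Python's out[i] = signal[i]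
def decimate_then_zeropad_alt (signal : List Int) : List Int :=
  let n : Int := signal.length
  let out := List.replicate (2 * PySem.Int.floordiv (n + 1) 2).toNat (0 : Int)
  (PySem.List.pyRange 0 n 2).foldl
    (fun out i => out.set i.toNat (PySem.List.pyGetD signal i 0)) out

-- ===== PRECONDITION & SPEC =====
def Spec_decimate_then_zeropad (signal : List Int) (out : List Int) : Prop := out = decimate_then_zeropad_alt signal
instance (signal : List Int) (out : List Int) : Decidable (Spec_decimate_then_zeropad signal out) := by unfold Spec_decimate_then_zeropad; infer_instance

-- ===== CLAIM (what is proved, stated in full; the proofs are below) =====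
def Claim_equal_decimate_then_zeropad : Prop := ∀ (signal : List Int), Dom_decimate_then_zeropad signal → Spec_decimate_then_zeropad signal (decimate_then_zeropad signal)

-- ===== LEMMAS AND PROOFS =====

-- canonical form: keep even-index samples, each followed by a zero
def canon : List Int → List Int
  | [] => []
  | [a] => [a, 0]
  | a :: _ :: t => a :: 0 :: canon t

-- every-other-element selector (flag = whether the current index is even)
def strided : Bool → List Int → List Int
  | _, [] => []
  | true, a :: t => a :: strided false t
  | false, _ :: t => strided true t

lemma emod_flip (s : Int) : ((s + 1) % 2 == 0) = !(s % 2 == 0) := by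
  rcases Int.emod_two_eq s with h | h <;>
    simp [h, show (s + 1) % 2 = 1 - s % 2 by omega]

lemma ds_fold (l : List Int) : ∀ (s : Int) (acc : List Int),
    (PySem.List.enumerate l s).foldl
      (fun acc p => if p.1 % 2 == 0 then acc ++ [p.2] else acc) acc
      = acc ++ strided (s % 2 == 0) l := by
  induction l with
  | nil => intro s acc; simp [PySem.List.enumerate_nil, strided]
  | cons a t ih =>
    intro s acc
    rw [PySem.List.enumerate_cons, List.foldl_cons, ih, emod_flip]
    by_cases h : s % 2 == 0 <;> simp [h, strided]

lemma up_fold (l : List Int) : ∀ (s : Int) (acc : List Int),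
    (PySem.List.enumerate l s).foldl
      (fun acc p => (acc ++ [p.2]) ++ [(0 : Int)]) acc
      = acc ++ l.flatMap (fun x => [x, 0]) := by
  induction l with
  | nil => intro s acc; simp [PySem.List.enumerate_nil]
  | cons a t ih => intro s acc; rw [PySem.List.enumerate_cons, List.foldl_cons, ih]; simp

lemma a_eq_canon (l : List Int) : decimate_then_zeropad l = canon l := by
  rw [decimate_then_zeropad]
  simp only [ds_fold, up_fold, List.nil_append]
  norm_num
  induction l using canon.induct with
  | case1 => simp [strided, canon]
  | case2 a => simp [strided, canon]
  | case3 a b t ih => simpa [strided, canon] using ih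

lemma pyRange_two_nil (a b : Int) (h : b ≤ a) : PySem.List.pyRange a b 2 = [] := by
  rw [PySem.List.pyRange_of_pos _ _ (by norm_num : (0:Int) < 2)]
  simp [show ¬ a < b by omega]

lemma pyRange_two_cons (a b : Int) (h : a < b) :
    PySem.List.pyRange a b 2 = a :: PySem.List.pyRange (a + 2) b 2 := by
  rw [PySem.List.pyRange_of_pos _ _ (by norm_num : (0:Int) < 2),
      PySem.List.pyRange_of_pos _ _ (by norm_num : (0:Int) < 2)]
  have hc : (if a < b then ((b - a + 2 - 1) / 2).toNat else 0)
      = (if a + 2 < b then ((b - (a + 2) + 2 - 1) / 2).toNat else 0) + 1 := by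
    split_ifs <;> omega
  rw [hc, List.range_succ_eq_map, List.map_cons, List.map_map]
  refine congrArg₂ _ (by norm_num) ?_
  exact List.map_congr_left (fun k _ => by simp [Function.comp]; ring)

lemma pyRange_shift2 (a b : Int) :
    PySem.List.pyRange (a + 2) b 2 = (PySem.List.pyRange a (b - 2) 2).map (· + 2) := by
  rw [PySem.List.pyRange_of_pos _ _ (by norm_num : (0:Int) < 2),
      PySem.List.pyRange_of_pos _ _ (by norm_num : (0:Int) < 2), List.map_map]
  have hc : (if a + 2 < b then ((b - (a + 2) + 2 - 1) / 2).toNat else 0)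
      = (if a < b - 2 then ((b - 2 - a + 2 - 1) / 2).toNat else 0) := by
    split_ifs <;> omega
  rw [hc]
  exact List.map_congr_left (fun k _ => by simp [Function.comp]; ring)

lemma foldl_set_shift2 (f : Int → Int) :
    ∀ (idxs : List Int), (∀ i ∈ idxs, 0 ≤ i) → ∀ (u v : Int) (rest : List Int),
      (idxs.map (· + 2)).foldl (fun o i => o.set i.toNat (f i)) (u :: v :: rest)
        = u :: v :: idxs.foldl (fun o i => o.set i.toNat (f (i + 2))) rest := by
  intro idxs
  induction idxs with
  | nil => intro _ u v rest; simp
  | cons i t ih =>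
    intro h u v rest
    have hi : 0 ≤ i := h i (by simp)
    have : (i + 2).toNat = i.toNat + 2 := by omega
    simp only [List.map_cons, List.foldl_cons, this]
    rw [show (u :: v :: rest).set (i.toNat + 2) (f (i + 2))
          = u :: v :: rest.set i.toNat (f (i + 2)) by simp [List.set]]
    exact ih (fun j hj => h j (by simp [hj])) u v _

lemma b_eq_canon (l : List Int) : decimate_then_zeropad_alt l = canon l := by
  induction l using canon.induct with
  | case1 => decide
  | case2 a =>
    rw [decimate_then_zeropad_alt]
    simp only [List.length_singleton, Nat.cast_one]
    rw [pyRange_two_cons 0 1 (by norm_num), pyRange_two_nil (0 + 2) 1 (by norm_num)]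
    norm_num [PySem.Int.floordiv_eq_ediv_of_pos (by norm_num : (0:Int) < 2), canon]
    rw [show Int.toNat 2 = 2 from rfl]
    simp [List.replicate]
  | case3 a b t ih =>
    rw [decimate_then_zeropad_alt]
    simp only [List.length_cons]
    have hn : ((t.length + 1 + 1 : Nat) : Int) = (t.length : Int) + 2 := by push_cast; ring
    rw [hn]
    have hL : (2 * PySem.Int.floordiv ((t.length : Int) + 2 + 1) 2).toNat
        = (2 * PySem.Int.floordiv ((t.length : Int) + 1) 2).toNat + 2 := by
      rw [PySem.Int.floordiv_eq_ediv_of_pos (by norm_num),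
          PySem.Int.floordiv_eq_ediv_of_pos (by norm_num)]
      omega
    rw [hL, pyRange_two_cons 0 _ (by positivity),
        show (0:Int) + 2 = 2 by norm_num,
        show PySem.List.pyRange 2 ((t.length : Int) + 2) 2
          = PySem.List.pyRange (0 + 2) ((t.length : Int) + 2) 2 by norm_num,
        pyRange_shift2 0 ((t.length : Int) + 2),
        show (t.length : Int) + 2 - 2 = (t.length : Int) by ring]
    simp only [List.replicate_succ, List.foldl_cons, Int.toNat_zero, List.set,
      PySem.List.pyGetD_zero_cons]
    rw [foldl_set_shift2 _ _ (fun i hi =>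
          ((PySem.List.mem_pyRange_iff_of_pos (by norm_num) i).1 hi).1)]
    have hbody : ∀ (o : List Int) (i : Int), i ∈ PySem.List.pyRange 0 (t.length : Int) 2 →
        o.set i.toNat (PySem.List.pyGetD (a :: b :: t) (i + 2) 0)
          = o.set i.toNat (PySem.List.pyGetD t i 0) := by
      intro o i hi
      obtain ⟨h0, h1, -⟩ := (PySem.List.mem_pyRange_iff_of_pos (by norm_num) i).1 hi
      rw [PySem.List.pyGetD_of_nonneg _ _ (show (0:Int) ≤ i + 2 by omega),
          PySem.List.pyGetD_of_nonneg _ _ h0]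
      have h2 : (i + 2).toNat = i.toNat + 2 := by omega
      simp [h2, List.getD]
    rw [PySem.List.foldl_congr_mem _ _
          (fun o i => o.set i.toNat (PySem.List.pyGetD t i 0)) _ hbody]
    rw [decimate_then_zeropad_alt] at ih
    simpa [canon] using ih

-- ===== VERDICT (by name: the statement is the Claim_ definition above) =====
theorem decimate_then_zeropad_spec : Claim_equal_decimate_then_zeropad := by
  intro signal _
  unfold Spec_decimate_then_zeropad
  rw [a_eq_canon, b_eq_canon]
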